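-- pv_equiv track=rewrite | github.com/MurageKibicho/Computational-Linguistics-Assignments | Project/markov.py | GenerateBigrams
-- ===== SOURCE A (Python) =====
-- def GenerateBigrams(data):
-- 	#Dictionary to hold bigrams
-- 	markovDictionary = {}
-- 	#Dictionary to store frequency counts
-- 	wordFrequencyCounter = {}
-- 	for line in data:
-- 		#Count word frequencies
-- 		for eachWord in line:
-- 			if eachWord in wordFrequencyCounter:
-- 				wordFrequencyCounter[eachWord] += 1
-- 			else:
-- 				wordFrequencyCounter[eachWord] = 1
-- 		#Initialize bigram dictionary
-- 		for i in range(0, len(line)):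
-- 			markovDictionary[line[i]] = {}
-- 	#Logic for creating bigrams
-- 	for line in data:
-- 		for i in range(0, len(line) - 1):
-- 			if(line[i+1] in markovDictionary[line[i]]):
-- 				markovDictionary[line[i]][line[i+1]] += 1
-- 			else:
-- 				markovDictionary[line[i]][line[i+1]] = 1
--
-- 	return markovDictionary, wordFrequencyCounter
-- ===== SOURCE B (Python) =====
-- def GenerateBigrams(data):
-- 	#Single scan: word frequencies, vocabulary in first-occurrence order,
-- 	#and flat bigram counts keyed by (w1, w2) tuples.
-- 	wordFrequencyCounter = {}
-- 	vocabulary = []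
-- 	flatBigramCounts = {}
-- 	for line in data:
-- 		previous = None
-- 		for word in line:
-- 			if word in wordFrequencyCounter:
-- 				wordFrequencyCounter[word] += 1
-- 			else:
-- 				wordFrequencyCounter[word] = 1
-- 				vocabulary.append(word)
-- 			if previous is not None:
-- 				pair = (previous, word)
-- 				flatBigramCounts[pair] = flatBigramCounts.get(pair, 0) + 1
-- 			previous = word
-- 	#Distribute the flat counts into the nested dictionary.
-- 	markovDictionary = {word: {} for word in vocabulary}
-- 	for (w1, w2), count in flatBigramCounts.items():
-- 		markovDictionary[w1][w2] = count
-- 	return markovDictionary, wordFrequencyCounter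
-- ===== Notes on version B (the rewrite author's own statement) =====
-- stated objective: alternative
-- what changed: Replaces A's three index-based passes (frequency loop, re-initialising every word's inner dict per occurrence, then a nested bigram-count pass into the nested dict) with one previous-word scan that builds the frequency dict, the vocabulary list and a FLAT bigram-count dict keyed by (w1,w2) tuples, followed by a distribution pass that creates each inner dict once and fills it from the flat counts.
import Mathlib
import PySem

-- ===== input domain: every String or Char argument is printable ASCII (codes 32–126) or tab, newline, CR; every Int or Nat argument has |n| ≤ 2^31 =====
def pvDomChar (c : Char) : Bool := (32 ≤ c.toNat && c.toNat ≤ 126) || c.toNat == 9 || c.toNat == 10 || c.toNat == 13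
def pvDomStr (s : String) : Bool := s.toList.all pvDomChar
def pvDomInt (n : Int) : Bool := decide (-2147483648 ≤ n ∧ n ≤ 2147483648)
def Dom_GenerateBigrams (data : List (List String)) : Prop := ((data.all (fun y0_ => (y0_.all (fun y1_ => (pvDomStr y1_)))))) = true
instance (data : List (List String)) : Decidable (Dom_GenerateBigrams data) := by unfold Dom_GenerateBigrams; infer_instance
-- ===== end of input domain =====

-- B replaces A's three passes by one previous-word scan building a flat (w1,w2)-count
-- dict plus a distribution pass; same values and insertion orders (objective: alternative).

-- ===== PORT A =====
-- Literal port of A: pass 1 over lines (word-frequency update, then an index loop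
-- re-initialising markovDictionary[line[i]] = {}), pass 2 counting bigrams in place.
-- line[i] / line[i+1] are in range wherever Python reads them, so pyGetD is exact.
def GenerateBigrams (data : List (List String)) :
    (List (String × List (String × Int))) × (List (String × Int)) :=
  let st := data.foldl (fun st line =>
      ((PySem.List.pyRange 0 (PySem.List.len line)).foldl
         (fun md i => md.insert (PySem.List.pyGetD line i "") PySem.Dict.empty) st.1,
       line.foldl (fun wf w =>
         if wf.contains w then wf.modify w 0 (· + 1) else wf.insert w 1) st.2))
    ((PySem.Dict.empty : PySem.Dict String (PySem.Dict String Int)),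
     (PySem.Dict.empty : PySem.Dict String Int))
  let md := data.foldl (fun md line =>
    (PySem.List.pyRange 0 (PySem.List.len line - 1)).foldl (fun md i =>
      md.modify (PySem.List.pyGetD line i "") PySem.Dict.empty (fun inner =>
        if inner.contains (PySem.List.pyGetD line (i + 1) "") then
          inner.modify (PySem.List.pyGetD line (i + 1) "") 0 (· + 1)
        else inner.insert (PySem.List.pyGetD line (i + 1) "") 1)) md) st.1
  (md.items.map (fun p => (p.1, p.2.items)), st.2.items)

-- ===== PORT B =====
-- Literal port of B (Source B): one scan carrying (frequency dict, vocabulary list,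
-- flat bigram dict, previous word), then {w: {} for w in vocabulary} and a
-- distribution pass over the flat dict's items.
def GenerateBigrams_alt (data : List (List String)) :
    (List (String × List (String × Int))) × (List (String × Int)) :=
  let st := data.foldl (fun st line =>
      line.foldl (fun st word =>
        let wfv := if st.1.contains word then (st.1.modify word 0 (· + 1), st.2.1)
                   else (st.1.insert word 1, st.2.1 ++ [word])
        (wfv.1, wfv.2,
         (match st.2.2.2 with
          | some prev => st.2.2.1.modify (prev, word) 0 (· + 1)
          | none => st.2.2.1),
         some word))
        (st.1, st.2.1, st.2.2.1, (none : Option String)))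
    ((PySem.Dict.empty : PySem.Dict String Int), ([] : List String),
     (PySem.Dict.empty : PySem.Dict (String × String) Int), (none : Option String))
  let md0 := st.2.1.foldl
    (fun d w => d.insert w (PySem.Dict.empty : PySem.Dict String Int)) PySem.Dict.empty
  let md := st.2.2.1.items.foldl
    (fun md q => md.modify q.1.1 PySem.Dict.empty (fun inner => inner.insert q.1.2 q.2)) md0
  (md.items.map (fun p => (p.1, p.2.items)), st.1.items)

-- ===== PRECONDITION & SPEC =====
def Spec_GenerateBigrams (data : List (List String)) (out : (List (String × List (String × Int))) × (List (String × Int))) : Prop := out = GenerateBigrams_alt data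
instance (data : List (List String)) (out : (List (String × List (String × Int))) × (List (String × Int))) : Decidable (Spec_GenerateBigrams data out) := by unfold Spec_GenerateBigrams; infer_instance

-- ===== CLAIM (what is proved, stated in full; the proofs are below) =====
def Claim_equal_GenerateBigrams : Prop := ∀ (data : List (List String)), Dom_GenerateBigrams data → Spec_GenerateBigrams data (GenerateBigrams data)

-- ===== LEMMAS AND PROOFS =====

-- Canonical shapes shared by both reductions.
def pvWords (data : List (List String)) : List String := data.flatten
def pvBigrams (data : List (List String)) : List (String × String) :=
  data.flatMap (fun l => l.zip l.tail)
def pvVocab (data : List (List String)) : List String := PySem.Set.ofList (pvWords data)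
def pvDmkE (K : List String) : PySem.Dict String (PySem.Dict String Int) :=
  ⟨K.map (fun w => (w, PySem.Dict.empty))⟩
def pvInner (bs : List (String × String)) (w : String) : PySem.Dict String Int :=
  PySem.Dict.counter ((bs.filter (fun p => p.1 == w)).map (·.2))

-- B-side step functions (the split of B's 4-tuple state).
def pvWvStep (s : PySem.Dict String Int × List String) (w : String) :
    PySem.Dict String Int × List String :=
  if s.1.contains w then (s.1.modify w 0 (· + 1), s.2) else (s.1.insert w 1, s.2 ++ [w])
def pvFpStep (s : PySem.Dict (String × String) Int × Option String) (w : String) :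
    PySem.Dict (String × String) Int × Option String :=
  ((match s.2 with
    | some prev => s.1.modify (prev, w) 0 (· + 1)
    | none => s.1), some w)
def pvLast (l : List String) : Option String :=
  match l with
  | [] => none
  | w :: t => some (t.getLastD w)

-- Python's "d[k] += 1 / d[k] = 1" branch IS d.modify k 0 (+1).
theorem pv_step_eq_cnt {κ : Type} [BEq κ] [LawfulBEq κ] (d : PySem.Dict κ Int) (w : κ) :
    (if d.contains w then d.modify w 0 (· + 1) else d.insert w 1) = d.modify w 0 (· + 1) := by
  cases h : d.contains w
  · have h1 : d.modify w 0 (· + 1) = d.insert w (d.getD w 0 + 1) := rfl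
    rw [h1, PySem.Dict.getD_of_not_contains d 0 h]
    simp
  · simp

-- A's init index loop over a line is the element loop.
theorem pv_insert_fold_md (line : List String) (md : PySem.Dict String (PySem.Dict String Int)) :
    (PySem.List.pyRange 0 (PySem.List.len line)).foldl
      (fun md i => md.insert (PySem.List.pyGetD line i "") PySem.Dict.empty) md
    = line.foldl (fun md w => md.insert w PySem.Dict.empty) md := by
  conv_rhs => rw [← PySem.List.map_pyGetD_pyRange_zero line ""]
  rw [List.foldl_map]

-- Index pairs (line[i], line[i+1]) for i < len-1 are zip line line.tail.
theorem pv_zip_map_range (l : List String) :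
    (PySem.List.pyRange 0 (PySem.List.len l - 1)).map
      (fun i => (PySem.List.pyGetD l i "", PySem.List.pyGetD l (i + 1) "")) = l.zip l.tail := by
  cases l with
  | nil => rfl
  | cons w t =>
    have hlen : PySem.List.len (w :: t) - 1 = ((t.length : Nat) : Int) := by
      simp [PySem.List.len]
    rw [hlen, PySem.List.pyRange_zero_natCast, List.map_map]
    apply List.ext_getElem
    · simp [List.length_zip]
    · intro i h1 h2
      simp only [List.getElem_map, List.getElem_range, Function.comp]
      have hi : i < t.length := by simpa using h1
      rw [List.getElem_zip, List.getElem_tail]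
      have hi1 : ((i : Int)).toNat < (w :: t).length := by simp; omega
      have hi2 : (((i : Int)) + 1).toNat < (w :: t).length := by simp; omega
      have g1 := PySem.List.pyGetD_eq_getElem (w :: t) (i := (i : Int)) "" (by positivity) (by simp; omega)
      have g2 := PySem.List.pyGetD_eq_getElem (w :: t) (i := (i : Int) + 1) "" (by positivity) (by simp; omega)
      rw [g1, g2]
      congr 1

theorem pv_contains_dmkE (K : List String) (w : String) :
    (pvDmkE K).contains w = decide (w ∈ K) := by
  simp [pvDmkE, PySem.Dict.contains_mk, List.any_map, Function.comp_def]
  induction K with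
  | nil => simp
  | cons a t ih =>
    rw [List.any_cons, ih]
    by_cases hw : w = a
    · subst hw; simp
    · have : (a == w) = false := by simp [Ne.symm hw]
      simp [this, hw]

theorem pv_ofList_concat {α : Type} [BEq α] (xs : List α) (x : α) :
    PySem.Set.ofList (xs ++ [x]) = PySem.Set.add (PySem.Set.ofList xs) x := by
  rw [PySem.Set.ofList_eq_foldl, PySem.Set.ofList_eq_foldl, List.foldl_append]
  rfl

theorem pv_set_contains_eq {α : Type} [BEq α] [LawfulBEq α] (s : PySem.Set α) (x : α) :
    PySem.Set.contains s x = decide (x ∈ s) := by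
  cases hc : PySem.Set.contains s x
  · have hn : x ∉ s := fun h => by
      rw [(PySem.Set.contains_iff s x).mpr h] at hc
      cases hc
    simp [hn]
  · simp [(PySem.Set.contains_iff s x).mp hc]

theorem pv_insE_step (K : List String) (w : String) :
    (pvDmkE K).insert w PySem.Dict.empty = pvDmkE (PySem.Set.add K w) := by
  have hc : PySem.Set.contains K w = decide (w ∈ K) := pv_set_contains_eq K w
  by_cases h : w ∈ K
  · have : (pvDmkE K).contains w = true := by rw [pv_contains_dmkE]; simp [h]
    apply PySem.Dict.ext
    rw [PySem.Dict.items_insert_of_contains _ _ this]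
    show (List.map _ (K.map _)) = (pvDmkE (PySem.Set.add K w)).items
    have hadd : PySem.Set.add K w = K := by simp [PySem.Set.add, h]
    rw [hadd, List.map_map]
    show K.map _ = (K.map _)
    apply List.map_congr_left
    intro k _
    by_cases hk : k = w
    · subst hk; simp
    · simp [hk, beq_iff_eq]
  · have hcf : (pvDmkE K).contains w = false := by rw [pv_contains_dmkE]; simp [h]
    apply PySem.Dict.ext
    rw [PySem.Dict.items_insert_of_not_contains _ _ hcf]
    have hadd : PySem.Set.add K w = K ++ [w] := by simp [PySem.Set.add, h]
    simp [pvDmkE, hadd]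

-- Inserting empty inner dicts accumulates the first-occurrence vocabulary.
theorem pv_insE_fold (ws : List String) : ∀ (K : List String),
    ws.foldl (fun d w => d.insert w PySem.Dict.empty) (pvDmkE K)
      = pvDmkE (PySem.Set.update K ws) := by
  induction ws with
  | nil => intro K; rfl
  | cons w t ih =>
    intro K
    simp only [List.foldl_cons]
    rw [pv_insE_step, ih]
    rfl

theorem pv_inner_append (bs : List (String × String)) (p : String × String) (w : String) :
    pvInner (bs ++ [p]) w
      = if w = p.1 then (pvInner bs w).modify p.2 0 (· + 1) else pvInner bs w := by
  unfold pvInner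
  rw [List.filter_append]
  by_cases hw : w = p.1
  · have : (([p] : List (String × String)).filter (fun q => q.1 == w)) = [p] := by
      simp [hw]
    rw [this, if_pos hw, List.map_append]
    exact PySem.Dict.counter_append_singleton _ _
  · have : (([p] : List (String × String)).filter (fun q => q.1 == w)) = [] := by
      simp [Ne.symm hw]
    rw [this, if_neg hw]
    simp

-- Characterisation of A's bigram-counting fold.
theorem pv_A_char (bs : List (String × String)) (K : List String) (hK : K.Nodup)
    (hsub : ∀ p ∈ bs, p.1 ∈ K) :
    bs.foldl (fun md p => md.modify p.1 PySem.Dict.empty (fun inner => inner.modify p.2 0 (· + 1)))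
      (pvDmkE K)
    = ⟨K.map (fun w => (w, pvInner bs w))⟩ := by
  induction bs using List.reverseRecOn with
  | nil =>
    show pvDmkE K = _
    unfold pvDmkE pvInner
    simp
    exact fun a _ => rfl
  | append_singleton bs p ih =>
    rw [List.foldl_append]
    rw [ih (fun q hq => hsub q (List.mem_append_left _ hq))]
    have hkeys : (⟨K.map (fun w => (w, pvInner bs w))⟩ : PySem.Dict String (PySem.Dict String Int)).keys = K := by
      simp [PySem.Dict.keys_mk, Function.comp_def]
    have hmem : p.1 ∈ K := hsub p (by simp)
    have hnd : (⟨K.map (fun w => (w, pvInner bs w))⟩ : PySem.Dict String (PySem.Dict String Int)).keys.Nodup := by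
      rw [hkeys]; exact hK
    have hitems : (p.1, pvInner bs p.1) ∈ (⟨K.map (fun w => (w, pvInner bs w))⟩ : PySem.Dict String (PySem.Dict String Int)).items :=
      List.mem_map.mpr ⟨p.1, hmem, rfl⟩
    have hgetD := PySem.Dict.getD_of_mem_items _ hitems hnd PySem.Dict.empty
    have hcont : (⟨K.map (fun w => (w, pvInner bs w))⟩ : PySem.Dict String (PySem.Dict String Int)).contains p.1 = true := by
      rw [PySem.Dict.contains_eq_decide_mem_keys, hkeys]; simp [hmem]
    show (⟨K.map (fun w => (w, pvInner bs w))⟩ : PySem.Dict String (PySem.Dict String Int)).insert p.1 _ = _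
    apply PySem.Dict.ext
    show ((⟨K.map (fun w => (w, pvInner bs w))⟩ : PySem.Dict String (PySem.Dict String Int)).insert p.1
      (((⟨K.map (fun w => (w, pvInner bs w))⟩ : PySem.Dict String (PySem.Dict String Int)).getD p.1 PySem.Dict.empty).modify p.2 0 (· + 1))).items
      = K.map (fun w => (w, pvInner (bs ++ [p]) w))
    rw [PySem.Dict.items_insert_of_contains _ _ hcont, hgetD]
    show List.map _ (K.map _) = K.map _
    rw [List.map_map]
    apply List.map_congr_left
    intro k _
    simp only [Function.comp_def]
    rw [pv_inner_append]
    by_cases hk : k = p.1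
    · have hbeq : (k == p.1) = true := by simp [hk]
      simp only [hbeq, if_pos, if_pos hk]
      rw [hk]
    · have hbeq : (k == p.1) = false := by simp [hk]
      simp [hbeq, hk]

-- Characterisation of B's distribution fold over distinct pairs.
theorem pv_B_char (P : List (String × String)) (c : String × String → Int) :
    ∀ (K : List String), K.Nodup → (∀ q ∈ P, q.1 ∈ K) →
    (∀ w : String, ((P.filter (fun q => q.1 == w)).map (·.2)).Nodup) →
    P.foldl (fun md q => md.modify q.1 PySem.Dict.empty (fun inner => inner.insert q.2 (c q)))
      (pvDmkE K)
    = ⟨K.map (fun w => (w, (⟨(P.filter (fun q => q.1 == w)).map (fun q => (q.2, c q))⟩ : PySem.Dict String Int)))⟩ := by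
  induction P using List.reverseRecOn with
  | nil =>
    intro K _ _ _
    show pvDmkE K = _
    unfold pvDmkE
    simp
    exact fun a _ => rfl
  | append_singleton P q ih =>
    intro K hK hsub hsnd
    have hsub' : ∀ r ∈ P, r.1 ∈ K := fun r hr => hsub r (List.mem_append_left _ hr)
    have hsnd' : ∀ w : String, ((P.filter (fun r => r.1 == w)).map (·.2)).Nodup := by
      intro w
      have := hsnd w
      rw [List.filter_append, List.map_append] at this
      exact List.Nodup.of_append_left this
    rw [List.foldl_append, ih K hK hsub' hsnd']
    set g := fun w => (⟨(P.filter (fun r => r.1 == w)).map (fun r => (r.2, c r))⟩ : PySem.Dict String Int) with hg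
    have hkeys : (⟨K.map (fun w => (w, g w))⟩ : PySem.Dict String (PySem.Dict String Int)).keys = K := by
      simp [PySem.Dict.keys_mk, Function.comp_def]
    have hmem : q.1 ∈ K := hsub q (by simp)
    have hnd : (⟨K.map (fun w => (w, g w))⟩ : PySem.Dict String (PySem.Dict String Int)).keys.Nodup := by
      rw [hkeys]; exact hK
    have hitems : (q.1, g q.1) ∈ (⟨K.map (fun w => (w, g w))⟩ : PySem.Dict String (PySem.Dict String Int)).items :=
      List.mem_map.mpr ⟨q.1, hmem, rfl⟩
    have hgetD := PySem.Dict.getD_of_mem_items _ hitems hnd PySem.Dict.empty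
    have hcont : (⟨K.map (fun w => (w, g w))⟩ : PySem.Dict String (PySem.Dict String Int)).contains q.1 = true := by
      rw [PySem.Dict.contains_eq_decide_mem_keys, hkeys]; simp [hmem]
    -- q.2 is not yet a key of g q.1
    have hq2 : q.2 ∉ (P.filter (fun r => r.1 == q.1)).map (·.2) := by
      have h1 := hsnd q.1
      rw [List.filter_append] at h1
      have : (([q] : List (String × String)).filter (fun r => r.1 == q.1)) = [q] := by simp
      rw [this, List.map_append] at h1
      intro hm
      exact (List.disjoint_of_nodup_append h1) hm (by simp)
    have hcont2 : (g q.1).contains q.2 = false := by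
      rw [hg]
      rw [PySem.Dict.contains_mk, List.any_map]
      rw [List.any_eq_false]
      intro r hr
      simp only [Function.comp_def]
      intro hbeq
      exact hq2 (List.mem_map.mpr ⟨r, hr, by simpa using hbeq⟩)
    show (⟨K.map (fun w => (w, g w))⟩ : PySem.Dict String (PySem.Dict String Int)).insert q.1
      (((⟨K.map (fun w => (w, g w))⟩ : PySem.Dict String (PySem.Dict String Int)).getD q.1 PySem.Dict.empty).insert q.2 (c q)) = _
    apply PySem.Dict.ext
    rw [PySem.Dict.items_insert_of_contains _ _ hcont, hgetD]
    show List.map _ (K.map _) = K.map _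
    rw [List.map_map]
    apply List.map_congr_left
    intro k _
    simp only [Function.comp_def]
    by_cases hk : k = q.1
    · have hbeq : (k == q.1) = true := by simp [hk]
      simp only [hbeq, if_pos]
      have hfil : ((P ++ [q]).filter (fun r => r.1 == k)) = P.filter (fun r => r.1 == k) ++ [q] := by
        rw [List.filter_append]
        congr 1
        simp [hk]
      rw [hfil, List.map_append]
      have : (g q.1).insert q.2 (c q) = ⟨(P.filter (fun r => r.1 == q.1)).map (fun r => (r.2, c r)) ++ [(q.2, c q)]⟩ := by
        apply PySem.Dict.ext
        rw [PySem.Dict.items_insert_of_not_contains _ _ hcont2]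
      rw [this, hk]
      rfl
    · have hbeq : (k == q.1) = false := by simp [hk]
      simp only [hbeq, Bool.false_eq_true, if_false]
      have hfil : ((P ++ [q]).filter (fun r => r.1 == k)) = P.filter (fun r => r.1 == k) := by
        rw [List.filter_append]
        have : (([q] : List (String × String)).filter (fun r => r.1 == k)) = [] := by
          simp [Ne.symm hk]
        rw [this, List.append_nil]
      rw [hfil]



-- set() of a filtered list, and set() through an injective map.
theorem pv_ofList_filter (p : String × String → Bool) (bs : List (String × String)) :
    PySem.Set.ofList (bs.filter p) = (PySem.Set.ofList bs).filter p := by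
  induction bs using List.reverseRecOn with
  | nil => rfl
  | append_singleton bs b ih =>
    rw [List.filter_append, pv_ofList_concat]
    by_cases hb : p b
    · have : List.filter p [b] = [b] := by simp [hb]
      rw [this, pv_ofList_concat, ih]
      show PySem.Set.add _ b = _
      rw [PySem.Set.add, PySem.Set.add]
      rw [pv_set_contains_eq, pv_set_contains_eq]
      by_cases hm : b ∈ PySem.Set.ofList bs
      · have hmf : b ∈ (PySem.Set.ofList bs).filter p := List.mem_filter.mpr ⟨hm, hb⟩
        simp [hm, hmf]
      · have hmf : b ∉ (PySem.Set.ofList bs).filter p := fun h => hm (List.mem_filter.mp h).1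
        simp [hm, hmf, List.filter_append, hb]
    · have : List.filter p [b] = [] := by simp [hb]
      rw [this, List.append_nil, ih]
      rw [PySem.Set.add, pv_set_contains_eq]
      by_cases hm : b ∈ PySem.Set.ofList bs
      · simp [hm]
      · simp [hm, List.filter_append, hb]

theorem pv_ofList_map_inj (l : List (String × String)) (f : String × String → String)
    (hinj : ∀ x ∈ l, ∀ y ∈ l, f x = f y → x = y) :
    PySem.Set.ofList (l.map f) = (PySem.Set.ofList l).map f := by
  induction l using List.reverseRecOn with
  | nil => rfl
  | append_singleton l a ih =>
    have hinj' : ∀ x ∈ l, ∀ y ∈ l, f x = f y → x = y := fun x hx y hy =>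
      hinj x (List.mem_append_left _ hx) y (List.mem_append_left _ hy)
    rw [List.map_append, show List.map f [a] = [f a] from rfl, pv_ofList_concat, pv_ofList_concat, ih hinj']
    show PySem.Set.add ((PySem.Set.ofList l).map f) (f a) = _
    rw [PySem.Set.add, PySem.Set.add, pv_set_contains_eq, pv_set_contains_eq]
    have hmemiff : f a ∈ (PySem.Set.ofList l).map f ↔ a ∈ PySem.Set.ofList l := by
      constructor
      · intro h
        obtain ⟨x, hx, hfx⟩ := List.mem_map.mp h
        have hx' : x ∈ l := (PySem.Set.mem_ofList l x).mp hx
        have : x = a := hinj x (List.mem_append_left _ hx') a (by simp) hfx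
        rwa [this] at hx
      · intro h
        exact List.mem_map.mpr ⟨a, h, rfl⟩
    by_cases hm : a ∈ PySem.Set.ofList l
    · simp [hm, hmemiff.mpr hm]
    · have : f a ∉ (PySem.Set.ofList l).map f := fun h => hm (hmemiff.mp h)
      simp [hm, this]

-- The two final inner dicts coincide.
theorem pv_inner_match (bs : List (String × String)) (w : String) :
    pvInner bs w
      = ⟨((PySem.Set.ofList bs).filter (fun q => q.1 == w)).map (fun q => (q.2, (bs.count q : Int)))⟩ := by
  unfold pvInner
  set F := bs.filter (fun p => p.1 == w) with hF
  set xs := F.map (·.2) with hxs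
  have hcounter : PySem.Dict.counter xs = ⟨(PySem.Set.ofList xs).map (fun k => (k, (xs.count k : Int)))⟩ := by
    apply PySem.Dict.ext
    rw [PySem.Dict.items_counter]
  rw [hcounter]
  -- rewrite the RHS index set
  rw [← pv_ofList_filter]
  have hinj : ∀ x ∈ F, ∀ y ∈ F, x.2 = y.2 → x = y := by
    intro x hx y hy h2
    have hx1 : x.1 = w := by simpa using (List.mem_filter.mp hx).2
    have hy1 : y.1 = w := by simpa using (List.mem_filter.mp hy).2
    cases x; cases y
    simp_all
  rw [hxs, pv_ofList_map_inj F (·.2) hinj, List.map_map]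
  congr 1
  rw [show (List.filter (fun q => q.1 == w) bs) = F from rfl]
  apply List.map_congr_left
  intro q hq
  have hqF : q ∈ F := (PySem.Set.mem_ofList F q).mp hq
  have hq1 : q.1 = w := by simpa using (List.mem_filter.mp hqF).2
  simp only [Function.comp_def]
  congr 1
  -- counts agree
  rw [List.count_eq_countP, List.count_eq_countP]
  rw [List.countP_map, show F = List.filter (fun p => p.1 == w) bs from hF, List.countP_filter]
  have hcc : List.countP (fun a => ((fun x => x == q.2) ∘ fun x => x.2) a && a.1 == w) bs = List.countP (fun x => x == q) bs := by
    apply List.countP_congr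
    intro r _
    have hpq : (r == q) = ((r.1 == q.1) && (r.2 == q.2)) := by cases r; cases q; rfl
    simp only [hpq, hq1, Function.comp_def, Bool.and_eq_true, beq_iff_eq]
    tauto
  rw [hcc]

-- B's per-line fold splits into the (freq, vocab) fold and the (flat, prev) fold.
theorem pv_split_line (l : List String) :
    ∀ (wf : PySem.Dict String Int) (vocab : List String)
      (flat : PySem.Dict (String × String) Int) (prev : Option String),
    l.foldl (fun st word =>
        let wfv := if st.1.contains word then (st.1.modify word 0 (· + 1), st.2.1)
                   else (st.1.insert word 1, st.2.1 ++ [word])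
        (wfv.1, wfv.2,
         (match st.2.2.2 with
          | some prev => st.2.2.1.modify (prev, word) 0 (· + 1)
          | none => st.2.2.1),
         some word)) (wf, vocab, flat, prev)
      = ((l.foldl pvWvStep (wf, vocab)).1, (l.foldl pvWvStep (wf, vocab)).2,
         (l.foldl pvFpStep (flat, prev)).1, (l.foldl pvFpStep (flat, prev)).2) := by
  induction l with
  | nil => intro wf vocab flat prev; rfl
  | cons w t ih =>
    intro wf vocab flat prev
    simp only [List.foldl_cons]
    rw [show (pvWvStep (wf, vocab) w) = ((pvWvStep (wf, vocab) w).1, (pvWvStep (wf, vocab) w).2) from rfl]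
    rw [show (pvFpStep (flat, prev) w) = ((pvFpStep (flat, prev) w).1, (pvFpStep (flat, prev) w).2) from rfl]
    rw [← ih]
    by_cases h : wf.contains w
    · simp only [pvWvStep, pvFpStep, h, if_pos]
    · simp only [pvWvStep, pvFpStep, h, Bool.false_eq_true, if_false]

-- The (flat, prev) fold over a line counts the line's bigrams.
theorem pv_fp_some (t : List String) :
    ∀ (x : String) (flat : PySem.Dict (String × String) Int),
    t.foldl pvFpStep (flat, some x)
      = (((x :: t).zip t).foldl (fun f p => f.modify p 0 (· + 1)) flat, some (t.getLastD x)) := by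
  induction t with
  | nil => intro x flat; rfl
  | cons y t ih =>
    intro x flat
    simp only [List.foldl_cons]
    rw [show pvFpStep (flat, some x) y = (flat.modify (x, y) 0 (· + 1), some y) from rfl]
    rw [ih]
    rw [show ((x :: y :: t).zip (y :: t)) = (x, y) :: ((y :: t).zip t) from rfl,
        List.foldl_cons, List.getLastD_cons]

theorem pv_fp_line (l : List String) (flat : PySem.Dict (String × String) Int) :
    l.foldl pvFpStep (flat, none)
      = ((l.zip l.tail).foldl (fun f p => f.modify p 0 (· + 1)) flat, pvLast l) := by
  cases l with
  | nil => rfl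
  | cons w t =>
    simp only [List.foldl_cons]
    rw [show pvFpStep (flat, none) w = (flat, some w) from rfl]
    rw [pv_fp_some]
    rfl

-- The (freq, vocab) fold keeps vocab = freq.keys.
theorem pv_wv_fold (l : List String) : ∀ (wf : PySem.Dict String Int),
    l.foldl pvWvStep (wf, wf.keys)
      = (l.foldl (fun d w => d.modify w 0 (· + 1)) wf,
         (l.foldl (fun d w => d.modify w 0 (· + 1)) wf).keys) := by
  induction l with
  | nil => intro wf; rfl
  | cons w t ih =>
    intro wf
    simp only [List.foldl_cons]
    cases h : wf.contains w
    case true =>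
      have hk : wf.keys = (wf.modify w 0 (· + 1)).keys := by
        rw [PySem.Dict.keys_modify, PySem.Dict.keys_insert_of_contains _ _ h]
      rw [show pvWvStep (wf, wf.keys) w = (wf.modify w 0 (· + 1), wf.keys) from by
        simp [pvWvStep, h]]
      rw [hk, ih]
    case false =>
      have hmod : wf.insert w 1 = wf.modify w 0 (· + 1) := by
        have h1 : wf.modify w 0 (· + 1) = wf.insert w (wf.getD w 0 + 1) := rfl
        rw [h1, PySem.Dict.getD_of_not_contains _ _ h]
        simp
      have hk : (wf.insert w 1).keys = wf.keys ++ [w] :=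
        PySem.Dict.keys_insert_of_not_contains _ _ h
      rw [show pvWvStep (wf, wf.keys) w = (wf.insert w 1, wf.keys ++ [w]) from by
        simp [pvWvStep, h]]
      rw [← hk, hmod, ih]

-- B's outer fold, fully split.
theorem pv_outer (data : List (List String)) :
    ∀ (wf : PySem.Dict String Int) (vocab : List String)
      (flat : PySem.Dict (String × String) Int) (prev : Option String),
    data.foldl (fun st line =>
      line.foldl (fun st word =>
        let wfv := if st.1.contains word then (st.1.modify word 0 (· + 1), st.2.1)
                   else (st.1.insert word 1, st.2.1 ++ [word])
        (wfv.1, wfv.2,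
         (match st.2.2.2 with
          | some prev => st.2.2.1.modify (prev, word) 0 (· + 1)
          | none => st.2.2.1),
         some word))
        (st.1, st.2.1, st.2.2.1, (none : Option String))) (wf, vocab, flat, prev)
      = ((data.flatten.foldl pvWvStep (wf, vocab)).1,
         (data.flatten.foldl pvWvStep (wf, vocab)).2,
         data.foldl (fun f l => (l.zip l.tail).foldl (fun f p => f.modify p 0 (· + 1)) f) flat,
         data.foldl (fun _ l => pvLast l) prev) := by
  induction data with
  | nil => intro wf vocab flat prev; rfl
  | cons l ds ih =>
    intro wf vocab flat prev
    simp only [List.foldl_cons, List.flatten_cons, List.foldl_append]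
    rw [pv_split_line]
    rw [pv_fp_line]
    rw [ih]

-- bigram heads are words.
theorem pv_head_mem (data : List (List String)) :
    ∀ p ∈ pvBigrams data, p.1 ∈ pvWords data := by
  intro p hp
  obtain ⟨l, hl, hz⟩ := List.mem_flatMap.mp hp
  obtain ⟨a, b⟩ := p
  have := (List.of_mem_zip hz).1
  exact List.mem_flatten.mpr ⟨l, hl, this⟩

-- Each side reduced to the same canonical value.
theorem pv_TA (data : List (List String)) :
    GenerateBigrams data
      = (((⟨(pvVocab data).map (fun w => (w, pvInner (pvBigrams data) w))⟩ :
            PySem.Dict String (PySem.Dict String Int))).items.map (fun p => (p.1, p.2.items)),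
         (PySem.Dict.counter (pvWords data)).items) := by
  unfold GenerateBigrams
  simp only []
  have hpair : data.foldl (fun st line =>
      ((PySem.List.pyRange 0 (PySem.List.len line)).foldl
         (fun md i => md.insert (PySem.List.pyGetD line i "") PySem.Dict.empty) st.1,
       line.foldl (fun wf w =>
         if wf.contains w then wf.modify w 0 (· + 1) else wf.insert w 1) st.2))
      ((PySem.Dict.empty : PySem.Dict String (PySem.Dict String Int)),
       (PySem.Dict.empty : PySem.Dict String Int))
      = (data.foldl (fun md line => (PySem.List.pyRange 0 (PySem.List.len line)).foldl
           (fun md i => md.insert (PySem.List.pyGetD line i "") PySem.Dict.empty) md)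
           (PySem.Dict.empty : PySem.Dict String (PySem.Dict String Int)),
         data.foldl (fun wf line => line.foldl (fun wf w =>
           if wf.contains w then wf.modify w 0 (· + 1) else wf.insert w 1) wf)
           (PySem.Dict.empty : PySem.Dict String Int)) :=
    PySem.List.foldl_prod_mk
      (fun (md : PySem.Dict String (PySem.Dict String Int)) (line : List String) =>
        (PySem.List.pyRange 0 (PySem.List.len line)).foldl
         (fun md i => md.insert (PySem.List.pyGetD line i "") PySem.Dict.empty) md)
      (fun (wf : PySem.Dict String Int) (line : List String) => line.foldl (fun wf w =>
         if wf.contains w then wf.modify w 0 (· + 1) else wf.insert w 1) wf)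
      data PySem.Dict.empty PySem.Dict.empty
  rw [hpair]
  have hwf : data.foldl (fun wf line => line.foldl (fun wf w =>
      if wf.contains w then wf.modify w 0 (· + 1) else wf.insert w 1) wf)
      (PySem.Dict.empty : PySem.Dict String Int)
      = PySem.Dict.counter (pvWords data) := by
    rw [PySem.List.foldl_congr_mem data _
      (fun wf line => line.foldl (fun d w => d.modify w 0 (· + 1)) wf) _
      (fun acc line _ => PySem.List.foldl_congr_mem line _ _ acc
        (fun acc2 w _ => pv_step_eq_cnt acc2 w))]
    rw [← List.foldl_flatten, ← PySem.Dict.counter_eq_foldl]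
    rfl
  have hmd0 : data.foldl (fun md line => (PySem.List.pyRange 0 (PySem.List.len line)).foldl
      (fun md i => md.insert (PySem.List.pyGetD line i "") PySem.Dict.empty) md)
      (PySem.Dict.empty : PySem.Dict String (PySem.Dict String Int))
      = pvDmkE (pvVocab data) := by
    rw [PySem.List.foldl_congr_mem data _
      (fun md line => line.foldl (fun md w => md.insert w PySem.Dict.empty) md) _
      (fun acc line _ => pv_insert_fold_md line acc)]
    rw [← List.foldl_flatten]
    rw [show (PySem.Dict.empty : PySem.Dict String (PySem.Dict String Int)) = pvDmkE [] from rfl]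
    rw [pv_insE_fold]
    rfl
  rw [hwf, hmd0]
  have hbig : data.foldl (fun md line =>
      (PySem.List.pyRange 0 (PySem.List.len line - 1)).foldl (fun md i =>
        md.modify (PySem.List.pyGetD line i "") PySem.Dict.empty (fun inner =>
          if inner.contains (PySem.List.pyGetD line (i + 1) "") then
            inner.modify (PySem.List.pyGetD line (i + 1) "") 0 (· + 1)
          else inner.insert (PySem.List.pyGetD line (i + 1) "") 1)) md)
      (pvDmkE (pvVocab data))
      = ⟨(pvVocab data).map (fun w => (w, pvInner (pvBigrams data) w))⟩ := by
    simp only [pv_step_eq_cnt]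
    rw [PySem.List.foldl_congr_mem data _
      (fun md line => (line.zip line.tail).foldl
        (fun md p => md.modify p.1 PySem.Dict.empty (fun inner => inner.modify p.2 0 (· + 1))) md) _
      (fun acc line _ => by
        show _ = (line.zip line.tail).foldl
          (fun md p => md.modify p.1 PySem.Dict.empty (fun inner => inner.modify p.2 0 (· + 1))) acc
        rw [← pv_zip_map_range line, List.foldl_map])]
    rw [← List.foldl_map
      (f := fun l : List String => l.zip l.tail)
      (g := fun (md : PySem.Dict String (PySem.Dict String Int)) (z : List (String × String)) =>
        z.foldl (fun md p => md.modify p.1 PySem.Dict.empty (fun inner => inner.modify p.2 0 (· + 1))) md)]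
    rw [← List.foldl_flatten, ← List.flatMap_def]
    exact pv_A_char _ _ (PySem.Set.nodup_ofList _)
      (fun p hp => (PySem.Set.mem_ofList _ _).mpr (pv_head_mem data p hp))
  rw [hbig]

theorem pv_TB (data : List (List String)) :
    GenerateBigrams_alt data
      = (((⟨(pvVocab data).map (fun w => (w, pvInner (pvBigrams data) w))⟩ :
            PySem.Dict String (PySem.Dict String Int))).items.map (fun p => (p.1, p.2.items)),
         (PySem.Dict.counter (pvWords data)).items) := by
  unfold GenerateBigrams_alt
  simp only []
  rw [pv_outer data PySem.Dict.empty [] PySem.Dict.empty none]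
  have hwv : data.flatten.foldl pvWvStep (PySem.Dict.empty, ([] : List String))
      = (PySem.Dict.counter (pvWords data), pvVocab data) := by
    rw [show ([] : List String) = (PySem.Dict.empty : PySem.Dict String Int).keys from rfl]
    rw [pv_wv_fold]
    rw [← PySem.Dict.counter_eq_foldl]
    rw [PySem.Dict.keys_counter]
    rfl
  rw [hwv]
  have hflat : data.foldl
      (fun f l => (l.zip l.tail).foldl (fun f p => f.modify p 0 (· + 1)) f)
      (PySem.Dict.empty : PySem.Dict (String × String) Int)
      = PySem.Dict.counter (pvBigrams data) := by
    rw [← List.foldl_map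
      (f := fun l : List String => l.zip l.tail)
      (g := fun (f : PySem.Dict (String × String) Int) (z : List (String × String)) =>
        z.foldl (fun f p => f.modify p 0 (· + 1)) f)]
    rw [← List.foldl_flatten, ← List.flatMap_def, ← PySem.Dict.counter_eq_foldl]
    rfl
  rw [hflat]
  have hmd0 : (pvVocab data).foldl
      (fun d w => d.insert w (PySem.Dict.empty : PySem.Dict String Int)) PySem.Dict.empty
      = pvDmkE (pvVocab data) := by
    rw [show (PySem.Dict.empty : PySem.Dict String (PySem.Dict String Int)) = pvDmkE [] from rfl]
    rw [pv_insE_fold]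
    rw [show PySem.Set.update ([] : List String) (pvVocab data) = PySem.Set.ofList (pvVocab data) from rfl]
    rw [PySem.Set.ofList_eq_self_of_nodup (pvVocab data) (PySem.Set.nodup_ofList _)]
  rw [hmd0]
  have hdist : (PySem.Dict.counter (pvBigrams data)).items.foldl
      (fun md q => md.modify q.1.1 PySem.Dict.empty (fun inner => inner.insert q.1.2 q.2))
      (pvDmkE (pvVocab data))
      = ⟨(pvVocab data).map (fun w => (w, pvInner (pvBigrams data) w))⟩ := by
    rw [PySem.Dict.items_counter]
    rw [List.foldl_map
      (f := fun k : String × String => (k, (List.count k (pvBigrams data) : Int)))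
      (g := fun (md : PySem.Dict String (PySem.Dict String Int)) (q : (String × String) × Int) =>
        md.modify q.1.1 PySem.Dict.empty (fun inner => inner.insert q.1.2 q.2))]
    rw [pv_B_char (PySem.Set.ofList (pvBigrams data))
      (fun q => (List.count q (pvBigrams data) : Int)) (pvVocab data)
      (PySem.Set.nodup_ofList _)
      (fun q hq => (PySem.Set.mem_ofList _ _).mpr
        (pv_head_mem data q ((PySem.Set.mem_ofList _ _).mp hq)))
      ?hsnd]
    case hsnd =>
      intro w
      apply List.Nodup.map_on
      · intro x hx y hy h2
        have hx1 : x.1 = w := by simpa using (List.mem_filter.mp hx).2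
        have hy1 : y.1 = w := by simpa using (List.mem_filter.mp hy).2
        cases x; cases y
        simp_all
      · exact List.Nodup.filter _ (PySem.Set.nodup_ofList _)
    congr 1
    apply List.map_congr_left
    intro w _
    rw [pv_inner_match]
  rw [hdist]

-- ===== VERDICT (by name: the statement is the Claim_ definition above) =====
theorem GenerateBigrams_spec : Claim_equal_GenerateBigrams := by
  intro data _
  unfold Spec_GenerateBigrams
  rw [pv_TA, pv_TB]
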